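-- pv_equiv track=rewrite | github.com/ThiagoBibiano/aredes-roteirizacao-numerario | apps/ui_streamlit/services/view_models.py | _highest_criticidade
-- ===== SOURCE A (Python) =====
-- from typing import Any, Iterable
--
-- CRITICITY_ORDER = {
--     None: -1,
--     "baixa": 0,
--     "media": 1,
--     "alta": 2,
--     "critica": 3,
-- }
--
-- def _highest_criticidade(values: Iterable[str]) -> str | None:
--     best: str | None = None
--     best_rank = -1
--     for value in values:
--         rank = CRITICITY_ORDER.get(value, -1)
--         if rank > best_rank:
--             best = value
--             best_rank = rank
--     return best
-- ===== SOURCE B (Python) =====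
-- def _highest_criticidade(values):
--     present = set(values)
--     for level in ("critica", "alta", "media", "baixa"):
--         if level in present:
--             return level
--     return None
-- ===== Notes on version B (the rewrite author's own statement) =====
-- stated objective: simpler
-- what changed: Instead of scanning values while tracking a running best/best_rank pair against a rank dict, B builds a membership set once and walks the fixed criticality scale from highest to lowest, returning the first level present.
import Mathlib
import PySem

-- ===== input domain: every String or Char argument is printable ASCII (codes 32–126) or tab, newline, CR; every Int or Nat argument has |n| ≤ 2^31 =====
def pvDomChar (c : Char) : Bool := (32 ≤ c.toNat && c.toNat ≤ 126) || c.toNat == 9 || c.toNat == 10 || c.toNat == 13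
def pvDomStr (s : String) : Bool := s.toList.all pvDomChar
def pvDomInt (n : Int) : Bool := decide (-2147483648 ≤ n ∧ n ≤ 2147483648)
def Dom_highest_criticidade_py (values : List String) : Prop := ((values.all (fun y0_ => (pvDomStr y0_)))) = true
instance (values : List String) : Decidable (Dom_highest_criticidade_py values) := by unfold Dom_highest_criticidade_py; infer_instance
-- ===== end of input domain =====

-- B replaces A's running-max scan over the values by a membership set queried against the fixed rank scale, highest first (objective: simpler).

-- ===== PORT A =====
def criticityOrder : PySem.Dict (Option String) Int :=
  PySem.Dict.ofList [(none, -1), (some "baixa", 0), (some "media", 1), (some "alta", 2), (some "critica", 3)]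

-- the 'for value in values' loop, carrying (best, best_rank)
def loopA : List String → (Option String × Int) → (Option String × Int)
  | [], st => st
  | value :: rest, st =>
      let rank := PySem.Dict.getD criticityOrder (some value) (-1)
      loopA rest (if rank > st.2 then (some value, rank) else st)

def highest_criticidade_py (values : List String) : Option String :=
  (loopA values (none, -1)).1

-- ===== PORT B =====
def highest_criticidade_py_alt (values : List String) : Option String :=
  let present : PySem.Set String := PySem.Set.ofList values
  ["critica", "alta", "media", "baixa"].find? (fun level => PySem.Set.contains present level)

-- ===== PRECONDITION & SPEC =====
def Spec_highest_criticidade_py (values : List String) (out : Option String) : Prop := out = highest_criticidade_py_alt values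
instance (values : List String) (out : Option String) : Decidable (Spec_highest_criticidade_py values out) := by unfold Spec_highest_criticidade_py; infer_instance

-- ===== CLAIM (what is proved, stated in full; the proofs are below) =====
def Claim_equal_highest_criticidade_py : Prop := ∀ (values : List String), Dom_highest_criticidade_py values → Spec_highest_criticidade_py values (highest_criticidade_py values)

-- ===== LEMMAS AND PROOFS =====

-- the rank lookup as an if-chain over the four level names
theorem rank_eq (x : String) :
    PySem.Dict.getD criticityOrder (some x) (-1) =
      if x = "baixa" then 0 else if x = "media" then 1 else if x = "alta" then 2
      else if x = "critica" then 3 else -1 := by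
  by_cases h1 : x = "baixa"
  · subst h1; decide
  by_cases h2 : x = "media"
  · subst h2; decide
  by_cases h3 : x = "alta"
  · subst h3; decide
  by_cases h4 : x = "critica"
  · subst h4; decide
  simp only [if_neg h1, if_neg h2, if_neg h3, if_neg h4]
  rw [PySem.Dict.getD_eq_get?_getD,
    show criticityOrder =
      PySem.Dict.mk [(none, -1), (some "baixa", 0), (some "media", 1), (some "alta", 2), (some "critica", 3)] from by decide]
  simp [PySem.Dict.get?, Ne.symm h1, Ne.symm h2, Ne.symm h3, Ne.symm h4]

-- closed form of the loop result: which level names occur, plus the carried rank r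
def gRes (xs : List String) (r : Int) : Option String :=
  if "critica" ∈ xs ∨ r = 3 then some "critica"
  else if "alta" ∈ xs ∨ r = 2 then some "alta"
  else if "media" ∈ xs ∨ r = 1 then some "media"
  else if "baixa" ∈ xs ∨ r = 0 then some "baixa"
  else none

-- loop invariant: the carried state is one of the five reachable (best, best_rank) pairs
def InvSt (b : Option String) (r : Int) : Prop :=
  (b = none ∧ r = -1) ∨ (b = some "baixa" ∧ r = 0) ∨ (b = some "media" ∧ r = 1) ∨
  (b = some "alta" ∧ r = 2) ∨ (b = some "critica" ∧ r = 3)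

theorem loop_eq : ∀ (xs : List String) (b : Option String) (r : Int), InvSt b r →
    (loopA xs (b, r)).1 = gRes xs r := by
  intro xs
  induction xs with
  | nil =>
    intro b r h
    rcases h with ⟨rfl, rfl⟩ | ⟨rfl, rfl⟩ | ⟨rfl, rfl⟩ | ⟨rfl, rfl⟩ | ⟨rfl, rfl⟩ <;>
      simp [loopA, gRes]
  | cons x xs ih =>
    intro b r h
    by_cases hc : x = "critica"
    · subst hc
      rcases h with ⟨rfl, rfl⟩ | ⟨rfl, rfl⟩ | ⟨rfl, rfl⟩ | ⟨rfl, rfl⟩ | ⟨rfl, rfl⟩ <;>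
        simp only [loopA, show PySem.Dict.getD criticityOrder (some "critica") (-1) = 3 from by decide] <;>
        norm_num <;>
        exact (ih _ _ (by simp [InvSt])).trans (by simp [gRes])
    by_cases ha : x = "alta"
    · subst ha
      rcases h with ⟨rfl, rfl⟩ | ⟨rfl, rfl⟩ | ⟨rfl, rfl⟩ | ⟨rfl, rfl⟩ | ⟨rfl, rfl⟩ <;>
        simp only [loopA, show PySem.Dict.getD criticityOrder (some "alta") (-1) = 2 from by decide] <;>
        norm_num <;>
        exact (ih _ _ (by simp [InvSt])).trans (by simp [gRes])
    by_cases hm : x = "media"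
    · subst hm
      rcases h with ⟨rfl, rfl⟩ | ⟨rfl, rfl⟩ | ⟨rfl, rfl⟩ | ⟨rfl, rfl⟩ | ⟨rfl, rfl⟩ <;>
        simp only [loopA, show PySem.Dict.getD criticityOrder (some "media") (-1) = 1 from by decide] <;>
        norm_num <;>
        exact (ih _ _ (by simp [InvSt])).trans (by simp [gRes])
    by_cases hb : x = "baixa"
    · subst hb
      rcases h with ⟨rfl, rfl⟩ | ⟨rfl, rfl⟩ | ⟨rfl, rfl⟩ | ⟨rfl, rfl⟩ | ⟨rfl, rfl⟩ <;>
        simp only [loopA, show PySem.Dict.getD criticityOrder (some "baixa") (-1) = 0 from by decide] <;>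
        norm_num <;>
        exact (ih _ _ (by simp [InvSt])).trans (by simp [gRes])
    · have hrk : PySem.Dict.getD criticityOrder (some x) (-1) = -1 := by
        rw [rank_eq]; simp [hb, hm, ha, hc]
      rcases h with ⟨rfl, rfl⟩ | ⟨rfl, rfl⟩ | ⟨rfl, rfl⟩ | ⟨rfl, rfl⟩ | ⟨rfl, rfl⟩ <;>
        simp only [loopA, hrk] <;>
        norm_num <;>
        exact (ih _ _ (by simp [InvSt])).trans
          (by simp [gRes, Ne.symm hc, Ne.symm ha, Ne.symm hm, Ne.symm hb])

theorem alt_eq (values : List String) : highest_criticidade_py_alt values = gRes values (-1) := by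
  unfold highest_criticidade_py_alt gRes
  by_cases hc : "critica" ∈ values <;> by_cases ha : "alta" ∈ values <;>
    by_cases hm : "media" ∈ values <;> by_cases hb : "baixa" ∈ values <;>
    simp [List.find?, PySem.Set.contains, PySem.Set.mem_ofList, hc, ha, hm, hb]

-- ===== VERDICT (by name: the statement is the Claim_ definition above) =====
theorem highest_criticidade_py_spec : Claim_equal_highest_criticidade_py := by
  intro values _
  unfold Spec_highest_criticidade_py highest_criticidade_py
  rw [alt_eq]
  exact loop_eq values none (-1) (Or.inl ⟨rfl, rfl⟩)
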